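-- pv_equiv track=rewrite | github.com/mariotrindadesantana-eng/V502V9 | src/services/anti_objection_system.py | _map_to_universal_objections
-- ===== SOURCE A (Python) =====
-- from typing import Dict, List, Any, Optional
--
-- def _map_to_universal_objections(analyzed_objections: List[Dict[str, Any]]) -> Dict[str, List[Dict[str, Any]]]:
--     """Mapeia objeções específicas para universais"""
--
--     mapped = {
--         'tempo': [],
--         'dinheiro': [],
--         'confianca': [],
--         'ocultas': []
--     }
--
--     for objection in analyzed_objections:
--         category = objection['categoria']
--         if category in mapped:
--             mapped[category].append(objection)
--         else:
--             mapped['ocultas'].append(objection)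
--
--     return mapped
-- ===== SOURCE B (Python) =====
-- def _map_to_universal_objections(analyzed_objections):
--     """Mapeia objeções específicas para universais"""
--     named = ('tempo', 'dinheiro', 'confianca')
--     result = {k: [o for o in analyzed_objections if o['categoria'] == k] for k in named}
--     result['ocultas'] = [o for o in analyzed_objections if o['categoria'] not in named]
--     return result
-- ===== Notes on version B (the rewrite author's own statement) =====
-- stated objective: simpler
-- what changed: Replaces the single branching loop that mutates four dict buckets with one per-bucket filter comprehension (the three named categories, then a catch-all filter for 'ocultas').
import Mathlib
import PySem

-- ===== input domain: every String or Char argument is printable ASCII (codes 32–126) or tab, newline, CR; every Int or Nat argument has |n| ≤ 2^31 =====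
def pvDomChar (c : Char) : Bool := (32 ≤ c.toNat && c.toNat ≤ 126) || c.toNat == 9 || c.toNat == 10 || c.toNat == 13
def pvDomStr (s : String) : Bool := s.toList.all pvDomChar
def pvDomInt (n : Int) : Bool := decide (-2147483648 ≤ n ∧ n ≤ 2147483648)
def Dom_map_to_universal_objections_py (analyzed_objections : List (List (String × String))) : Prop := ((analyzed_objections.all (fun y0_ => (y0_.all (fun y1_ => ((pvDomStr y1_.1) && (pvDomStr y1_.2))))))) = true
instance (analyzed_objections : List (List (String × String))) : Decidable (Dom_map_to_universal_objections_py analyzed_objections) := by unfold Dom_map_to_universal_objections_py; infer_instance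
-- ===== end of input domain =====

-- B replaces A's single branching loop over four mutable buckets by one filter per bucket (simpler decomposition).

-- ===== PORT A =====
-- the loop body: look up objection['categoria'] (none = KeyError, excluded by Pre_),
-- append to its bucket if the category is a key of mapped, else to 'ocultas'
def pvStepA (mapped : PySem.Dict String (List (List (String × String))))
    (objection : List (String × String)) : PySem.Dict String (List (List (String × String))) :=
  match (PySem.Dict.mk objection).get? "categoria" with
  | none => mapped   -- Python raises KeyError here; unreachable under Pre_
  | some category =>
    if mapped.contains category then
      mapped.modify category [] (fun l => l ++ [objection])
    else
      mapped.modify "ocultas" [] (fun l => l ++ [objection])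

def map_to_universal_objections_py (analyzed_objections : List (List (String × String))) : List (String × List (List (String × String))) :=
  (analyzed_objections.foldl pvStepA
    (PySem.Dict.mk [("tempo", []), ("dinheiro", []), ("confianca", []), ("ocultas", [])])).items

-- ===== PORT B =====
def pvCat (objection : List (String × String)) : String :=
  ((PySem.Dict.mk objection).get? "categoria").getD ""

def map_to_universal_objections_py_alt (analyzed_objections : List (List (String × String))) : List (String × List (List (String × String))) :=
  [("tempo", analyzed_objections.filter (fun o => pvCat o == "tempo")),
   ("dinheiro", analyzed_objections.filter (fun o => pvCat o == "dinheiro")),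
   ("confianca", analyzed_objections.filter (fun o => pvCat o == "confianca")),
   ("ocultas", analyzed_objections.filter (fun o =>
      !(PySem.Set.contains (PySem.Set.ofList ["tempo", "dinheiro", "confianca"]) (pvCat o))))]

-- ===== PRECONDITION & SPEC =====
-- Pre_ excludes exactly the inputs where some objection lacks the key 'categoria': there Python A raises KeyError.
def Pre_map_to_universal_objections_py (analyzed_objections : List (List (String × String))) : Prop :=
  ∀ o ∈ analyzed_objections, (PySem.Dict.mk o).contains "categoria" = true
instance (analyzed_objections : List (List (String × String))) : Decidable (Pre_map_to_universal_objections_py analyzed_objections) := by unfold Pre_map_to_universal_objections_py; infer_instance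
def pvWitness_map_to_universal_objections_py : (List (List (String × String))) :=
  [[("categoria", "tempo")], [("categoria", "rara"), ("x", "y")]]

def Spec_map_to_universal_objections_py (analyzed_objections : List (List (String × String))) (out : List (String × List (List (String × String)))) : Prop := out = map_to_universal_objections_py_alt analyzed_objections
instance (analyzed_objections : List (List (String × String))) (out : List (String × List (List (String × String)))) : Decidable (Spec_map_to_universal_objections_py analyzed_objections out) := by unfold Spec_map_to_universal_objections_py; infer_instance

-- ===== CLAIM (what is proved, stated in full; the proofs are below) =====
def Claim_equal_map_to_universal_objections_py : Prop := ∀ (analyzed_objections : List (List (String × String))), Dom_map_to_universal_objections_py analyzed_objections → Pre_map_to_universal_objections_py analyzed_objections → Spec_map_to_universal_objections_py analyzed_objections (map_to_universal_objections_py analyzed_objections)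

-- ===== LEMMAS AND PROOFS =====

-- one step of A's loop on a 4-bucket dict, category s
theorem pv_step (x : List (String × String)) (s : String)
    (hs : (PySem.Dict.mk x).get? "categoria" = some s)
    (t d c k : List (List (String × String))) :
    pvStepA (PySem.Dict.mk [("tempo", t), ("dinheiro", d), ("confianca", c), ("ocultas", k)]) x
    = PySem.Dict.mk
        [("tempo", if s = "tempo" then t ++ [x] else t),
         ("dinheiro", if s = "dinheiro" then d ++ [x] else d),
         ("confianca", if s = "confianca" then c ++ [x] else c),
         ("ocultas", if s = "tempo" ∨ s = "dinheiro" ∨ s = "confianca" then k else k ++ [x])] := by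
  simp only [pvStepA, hs]
  by_cases h1 : s = "tempo"
  · subst h1
    simp [PySem.Dict.contains, PySem.Dict.modify, PySem.Dict.getD, PySem.Dict.get?,
      PySem.Dict.insert]
  · by_cases h2 : s = "dinheiro"
    · subst h2
      simp [PySem.Dict.contains, PySem.Dict.modify, PySem.Dict.getD, PySem.Dict.get?,
        PySem.Dict.insert]
    · by_cases h3 : s = "confianca"
      · subst h3
        simp [PySem.Dict.contains, PySem.Dict.modify, PySem.Dict.getD, PySem.Dict.get?,
          PySem.Dict.insert]
      · by_cases h4 : s = "ocultas"
        · subst h4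
          simp [PySem.Dict.contains, PySem.Dict.modify, PySem.Dict.getD, PySem.Dict.get?,
            PySem.Dict.insert]
        · simp [PySem.Dict.contains, PySem.Dict.modify, PySem.Dict.getD, PySem.Dict.get?,
            PySem.Dict.insert, h1, h2, h3, Ne.symm h1, Ne.symm h2, Ne.symm h3, Ne.symm h4]

-- loop invariant: folding A's step over xs from a 4-bucket dict appends each bucket's filter
theorem pv_loop (xs : List (List (String × String)))
    (hx : ∀ o ∈ xs, (PySem.Dict.mk o).contains "categoria" = true)
    (t d c k : List (List (String × String))) :
    (xs.foldl pvStepA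
      (PySem.Dict.mk [("tempo", t), ("dinheiro", d), ("confianca", c), ("ocultas", k)])).items
    = [("tempo", t ++ xs.filter (fun o => pvCat o == "tempo")),
       ("dinheiro", d ++ xs.filter (fun o => pvCat o == "dinheiro")),
       ("confianca", c ++ xs.filter (fun o => pvCat o == "confianca")),
       ("ocultas", k ++ xs.filter (fun o =>
          !(PySem.Set.contains (PySem.Set.ofList ["tempo", "dinheiro", "confianca"]) (pvCat o))))] := by
  induction xs generalizing t d c k with
  | nil => simp
  | cons x xs ih =>
    have hxc := hx x (by simp)
    obtain ⟨s, hs⟩ : ∃ s, (PySem.Dict.mk x).get? "categoria" = some s := by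
      rcases h : (PySem.Dict.mk x).get? "categoria" with _ | s
      · rw [PySem.Dict.contains_eq_isSome_get?, h] at hxc; simp at hxc
      · exact ⟨s, rfl⟩
    have hcat : pvCat x = s := by simp [pvCat, hs]
    have hrest : ∀ o ∈ xs, (PySem.Dict.mk o).contains "categoria" = true :=
      fun o ho => hx o (List.mem_cons_of_mem _ ho)
    rw [List.foldl_cons, pv_step x s hs, ih hrest]
    simp only [List.filter_cons, hcat, PySem.Set.contains]
    by_cases h1 : s = "tempo"
    · subst h1; simp
    · by_cases h2 : s = "dinheiro"
      · subst h2; simp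
      · by_cases h3 : s = "confianca"
        · subst h3; simp
        · simp [h1, h2, h3]

-- ===== VERDICT (by name: the statement is the Claim_ definition above) =====
theorem map_to_universal_objections_py_spec : Claim_equal_map_to_universal_objections_py := by
  intro xs _ hpre
  show _ = _
  rw [map_to_universal_objections_py, pv_loop xs hpre]
  rfl
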